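-- pv_equiv track=rewrite | github.com/joeldeaguero/blinkie | main.py | bcc_calc
-- ===== SOURCE A (Python) =====
-- def bcc_calc(bcc_int):
-- 	bcc = (~bcc_int & 0xFFF) + 1        # 2's complement calculation (= one's complement + 1)
-- 	for i in range(11, 7, -1):
-- 		if bcc > 2**i:
-- 			bcc -= 2**i                 # takes the LSB of the integer
-- 	bcc = hex(bcc).upper()[2:]          # converts the integer to hex characters
-- 	if len(bcc) == 1: bcc = '0' + bcc   # protocol needs BCC to be two characters
-- 	return bcc
-- ===== SOURCE B (Python) =====
-- def bcc_calc(bcc_int):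
--     # only the low 8 bits of the two's complement matter; format pads to 2 chars
--     return format((~bcc_int & 0xFF) + 1, '02X')
-- ===== Notes on version B (the rewrite author's own statement) =====
-- stated objective: simpler
-- what changed: The 12-bit mask plus the greedy bit-subtraction loop over 2^11..2^8 is replaced by the closed form (~bcc_int & 0xFF) + 1, and the hex/upper/slice/manual-pad pipeline by a single format(..., '02X') call.
import Mathlib
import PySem

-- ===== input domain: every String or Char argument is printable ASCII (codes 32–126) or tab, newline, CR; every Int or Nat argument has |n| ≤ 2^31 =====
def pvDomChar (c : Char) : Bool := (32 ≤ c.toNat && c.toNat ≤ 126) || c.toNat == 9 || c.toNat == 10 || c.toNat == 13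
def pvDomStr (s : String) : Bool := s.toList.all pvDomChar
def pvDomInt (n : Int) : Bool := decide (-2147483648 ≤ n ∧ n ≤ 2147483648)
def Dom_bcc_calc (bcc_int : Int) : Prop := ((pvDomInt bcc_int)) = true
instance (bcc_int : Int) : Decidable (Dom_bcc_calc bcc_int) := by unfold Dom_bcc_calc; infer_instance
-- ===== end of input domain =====

-- B replaces the 12-bit mask + greedy bit-subtraction loop by the closed form (~x & 0xFF) + 1
-- and the hex/upper/slice/manual-pad pipeline by one zero-padded uppercase formatting (simpler).

-- ===== PORT A =====
-- hand port of Python's hex() on nonnegative ints: lowercase digits, most significant first;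
-- the fuel argument (= n) only makes the repeated /16 recursion structural, it never runs out.
def pvHexDigitLower (d : Nat) : Char := if d < 10 then Char.ofNat (48 + d) else Char.ofNat (87 + d)

def pvHexRecLower : Nat → Nat → List Char
  | 0, n => [pvHexDigitLower (n % 16)]
  | fuel+1, n => if n < 16 then [pvHexDigitLower n] else pvHexRecLower fuel (n / 16) ++ [pvHexDigitLower (n % 16)]

def pvHexDigitsLower (n : Nat) : List Char := pvHexRecLower n n

def pvHex (n : Int) : String :=
  if n < 0 then "-0x" ++ String.ofList (pvHexDigitsLower (-n).toNat)
  else "0x" ++ String.ofList (pvHexDigitsLower n.toNat)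

def bcc_calc (bcc_int : Int) : String :=
  -- bcc = (~bcc_int & 0xFFF) + 1   (Python ~x = -x-1)
  let bcc := PySem.Int.band (-bcc_int - 1) 4095 + 1
  -- for i in range(11, 7, -1): if bcc > 2**i: bcc -= 2**i   (i runs over 11..8, nonnegative, so 2**i = 2^i.toNat)
  let bcc := (PySem.List.pyRange 11 7 (-1)).foldl
    (fun b i => if b > (2 : Int) ^ i.toNat then b - (2 : Int) ^ i.toNat else b) bcc
  -- bcc = hex(bcc).upper()[2:]
  let s := PySem.Str.slice (PySem.Str.upper (pvHex bcc)) (some 2) none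
  -- if len(bcc) == 1: bcc = '0' + bcc
  if PySem.Str.len s == 1 then "0" ++ s else s

-- ===== PORT B =====
-- uppercase hex digits of a nonnegative int, most significant first (same fuel scheme)
def pvHexDigitUpper (d : Nat) : Char := if d < 10 then Char.ofNat (48 + d) else Char.ofNat (55 + d)

def pvHexRecUpper : Nat → Nat → List Char
  | 0, n => [pvHexDigitUpper (n % 16)]
  | fuel+1, n => if n < 16 then [pvHexDigitUpper n] else pvHexRecUpper fuel (n / 16) ++ [pvHexDigitUpper (n % 16)]

def pvHexDigitsUpper (n : Nat) : List Char := pvHexRecUpper n n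

def bcc_calc_alt (bcc_int : Int) : String :=
  -- format((~bcc_int & 0xFF) + 1, '02X'); the value is ≥ 1, so '02X' is a zero-fill to width 2
  PySem.Str.zfill (String.ofList (pvHexDigitsUpper (PySem.Int.band (-bcc_int - 1) 255 + 1).toNat)) 2

-- ===== PRECONDITION & SPEC =====
def Spec_bcc_calc (bcc_int : Int) (out : String) : Prop := out = bcc_calc_alt bcc_int
instance (bcc_int : Int) (out : String) : Decidable (Spec_bcc_calc bcc_int out) := by unfold Spec_bcc_calc; infer_instance

-- ===== CLAIM (what is proved, stated in full; the proofs are below) =====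
def Claim_equal_bcc_calc : Prop := ∀ (bcc_int : Int), Dom_bcc_calc bcc_int → Spec_bcc_calc bcc_int (bcc_calc bcc_int)

-- ===== LEMMAS AND PROOFS =====

theorem pvBand4095 (a : Int) : PySem.Int.band a 4095 = a % 4096 := by
  unfold PySem.Int.band
  by_cases h : 0 ≤ a
  · have hm : a.toNat &&& (4095:Int).toNat = a.toNat % 4096 := Nat.and_two_pow_sub_one_eq_mod a.toNat 12
    rw [if_pos h, if_pos (by norm_num : (0:Int) ≤ 4095), hm]; omega
  · have hm : (4095 : Int).toNat &&& (-a - 1).toNat = (-a - 1).toNat % 4096 := by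
      rw [Nat.and_comm]; exact Nat.and_two_pow_sub_one_eq_mod _ 12
    rw [if_neg h, if_pos (by norm_num : (0:Int) ≤ 4095), hm]; omega

theorem pvBand255 (a : Int) : PySem.Int.band a 255 = a % 256 := by
  unfold PySem.Int.band
  by_cases h : 0 ≤ a
  · have hm : a.toNat &&& (255:Int).toNat = a.toNat % 256 := Nat.and_two_pow_sub_one_eq_mod a.toNat 8
    rw [if_pos h, if_pos (by norm_num : (0:Int) ≤ 255), hm]; omega
  · have hm : (255 : Int).toNat &&& (-a - 1).toNat = (-a - 1).toNat % 256 := by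
      rw [Nat.and_comm]; exact Nat.and_two_pow_sub_one_eq_mod _ 8
    rw [if_neg h, if_pos (by norm_num : (0:Int) ≤ 255), hm]; omega

theorem pvLoopEq (b : Int) (h1 : 1 ≤ b) (h2 : b ≤ 4096) :
    (PySem.List.pyRange 11 7 (-1)).foldl
      (fun b i => if b > (2 : Int) ^ i.toNat then b - (2 : Int) ^ i.toNat else b) b
    = (b - 1) % 256 + 1 := by
  rw [(by decide : PySem.List.pyRange 11 7 (-1) = [11, 10, 9, 8])]
  simp only [List.foldl_cons, List.foldl_nil]
  rw [(by decide : (2:Int) ^ (11:Int).toNat = 2048), (by decide : (2:Int) ^ (10:Int).toNat = 1024),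
      (by decide : (2:Int) ^ (9:Int).toNat = 512), (by decide : (2:Int) ^ (8:Int).toNat = 256)]
  split_ifs <;> omega

set_option maxRecDepth 20000 in
set_option maxHeartbeats 2000000 in
theorem pvFormatsEq : ∀ k : Nat, k < 256 →
    (let s := PySem.Str.slice (PySem.Str.upper (pvHex ((k : Int) + 1))) (some 2) none;
     if PySem.Str.len s == 1 then "0" ++ s else s)
    = PySem.Str.zfill (String.ofList (pvHexDigitsUpper ((k : Int) + 1).toNat)) 2 := by
  decide

-- ===== VERDICT (by name: the statement is the Claim_ definition above) =====
theorem bcc_calc_spec : Claim_equal_bcc_calc := by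
  intro x _
  unfold Spec_bcc_calc
  simp only [bcc_calc, bcc_calc_alt, pvBand4095, pvBand255]
  have h4 : 0 ≤ (-x - 1) % 4096 ∧ (-x - 1) % 4096 < 4096 :=
    ⟨Int.emod_nonneg _ (by norm_num), Int.emod_lt_of_pos _ (by norm_num)⟩
  rw [pvLoopEq ((-x - 1) % 4096 + 1) (by omega) (by omega)]
  have hmm : ((-x - 1) % 4096 + 1 - 1) % 256 = (-x - 1) % 256 := by omega
  rw [hmm]
  have h2 : 0 ≤ (-x - 1) % 256 ∧ (-x - 1) % 256 < 256 :=
    ⟨Int.emod_nonneg _ (by norm_num), Int.emod_lt_of_pos _ (by norm_num)⟩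
  have hk : (-x - 1) % 256 = (((-x - 1) % 256).toNat : Int) := by omega
  rw [hk]
  exact pvFormatsEq ((-x - 1) % 256).toNat (by omega)
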